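-- pv_equiv track=rewrite | github.com/rdmunden/challenges | set_2/23.py | solution
-- ===== SOURCE A (Python) =====
-- def solution(A, S):
--     success = 0
--     for i in range(len(A)):
--         segment = A[i:]
--         total = 0
--         cnt = 1
--         for n in segment:
--             total += n
--             if total == cnt*S:
--                 success +=1
--                 # print (f'{cnt}')
--                 # print (f'{n}')
--                 # print ('--')
--                 if success == 1000000000:
--                     break
--             cnt += 1
--
--         if success == 1000000000:
--             break
--
--     return success
-- ===== SOURCE B (Python) =====
-- def solution(A, S):
--     counts = {0: 1}
--     pref = 0
--     total = 0
--     for a in A: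
--         pref += a - S
--         total += counts.get(pref, 0)
--         counts[pref] = counts.get(pref, 0) + 1
--     return min(total, 1000000000)
-- ===== Notes on version B (the rewrite author's own statement) =====
-- stated objective: faster
-- what changed: Replaced the nested scan over all suffixes by a single pass over prefix sums of (a - S) with a hash-map counter of previously seen prefix values, capping the final count with min(total, 1e9).
import Mathlib
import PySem

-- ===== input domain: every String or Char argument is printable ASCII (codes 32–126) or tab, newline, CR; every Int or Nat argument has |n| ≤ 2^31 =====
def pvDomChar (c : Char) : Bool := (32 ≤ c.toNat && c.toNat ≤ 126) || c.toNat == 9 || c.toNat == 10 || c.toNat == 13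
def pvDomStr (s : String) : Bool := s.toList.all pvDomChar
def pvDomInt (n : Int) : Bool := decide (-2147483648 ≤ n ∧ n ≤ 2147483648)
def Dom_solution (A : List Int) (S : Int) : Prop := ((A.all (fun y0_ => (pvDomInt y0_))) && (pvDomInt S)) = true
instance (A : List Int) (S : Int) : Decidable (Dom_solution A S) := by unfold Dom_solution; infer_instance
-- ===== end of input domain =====

-- B replaces A's nested scan over all suffixes by one pass over prefix sums of (a - S)
-- with a hash-map counter; objective: faster (asymptotic).

-- ===== PORT A =====
-- inner 'for n in segment' loop, with the 'if success == 1000000000: break'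
def innerA (S : Int) : List Int → Int → Int → Int → Int
  | [], _total, _cnt, success => success
  | n :: rest, total, cnt, success =>
    let total := total + n
    if total = cnt * S then
      let success := success + 1
      if success = 1000000000 then success
      else innerA S rest total (cnt + 1) success
    else innerA S rest total (cnt + 1) success

-- outer 'for i in range(len(A))' loop, with its trailing break
def outerA (A : List Int) (S : Int) : List Int → Int → Int
  | [], success => success
  | i :: is, success =>
    let segment := PySem.List.slice A (some i) none
    let success := innerA S segment 0 1 success
    if success = 1000000000 then success else outerA A S is success

def solution (A : List Int) (S : Int) : Int :=
  outerA A S (PySem.List.pyRange 0 (A.length : Int) 1) 0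

-- ===== PORT B =====
def bStep (S : Int) (st : PySem.Dict Int Int × Int × Int) (a : Int) :
    PySem.Dict Int Int × Int × Int :=
  let pref := st.2.1 + (a - S)
  let total := st.2.2 + st.1.getD pref 0
  let counts := st.1.insert pref (st.1.getD pref 0 + 1)
  (counts, pref, total)

def solution_alt (A : List Int) (S : Int) : Int :=
  let st := A.foldl (bStep S) (PySem.Dict.ofList [((0 : Int), (1 : Int))], 0, 0)
  min st.2.2 1000000000

-- ===== PRECONDITION & SPEC =====
def Spec_solution (A : List Int) (S : Int) (out : Int) : Prop := out = solution_alt A S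
instance (A : List Int) (S : Int) (out : Int) : Decidable (Spec_solution A S out) := by unfold Spec_solution; infer_instance

-- ===== CLAIM (what is proved, stated in full; the proofs are below) =====
def Claim_equal_solution : Prop := ∀ (A : List Int) (S : Int), Dom_solution A S → Spec_solution A S (solution A S)

-- ===== LEMMAS AND PROOFS =====

-- number of nonempty prefixes of l whose sum is -acc
def zcount : List Int → Int → Int
  | [], _ => 0
  | x :: l, acc => (if acc + x = 0 then 1 else 0) + zcount l (acc + x)

-- A's inner-loop count (no cap)
def kcount (S : Int) : List Int → Int → Int → Int
  | [], _tot, _cnt => 0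
  | n :: l, tot, cnt => (if tot + n = cnt * S then 1 else 0) + kcount S l (tot + n) (cnt + 1)

-- B's count: ks is the multiset of previously seen prefix values, p the running prefix
def hcount : List Int → Int → List Int → Int
  | _ks, _p, [] => 0
  | ks, p, b :: l => (ks.count (p + b) : Int) + hcount (ks ++ [p + b]) (p + b) l

-- number of equal-prefix pairs
def pairc : List Int → Int
  | [] => 0
  | c :: l => zcount (c :: l) 0 + pairc l

theorem kcount_nonneg (S : Int) (l : List Int) (tot cnt : Int) : 0 ≤ kcount S l tot cnt := by
  induction l generalizing tot cnt with
  | nil => simp [kcount]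
  | cons n l ih =>
    simp only [kcount]
    have := ih (tot + n) (cnt + 1)
    split <;> omega

theorem kcount_eq_zcount (S : Int) (l : List Int) (tot cnt : Int) :
    kcount S l tot cnt = zcount (l.map (· - S)) (tot - (cnt - 1) * S) := by
  induction l generalizing tot cnt with
  | nil => simp [kcount, zcount]
  | cons n l ih =>
    simp only [kcount, List.map_cons, zcount]
    have h1 : (tot + n = cnt * S) ↔ (tot - (cnt - 1) * S + (n - S) = 0) := by constructor <;> intro h <;> nlinarith
    have h2 : tot - (cnt - 1) * S + (n - S) = tot + n - (cnt + 1 - 1) * S := by ring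
    rw [ih (tot + n) (cnt + 1)]
    by_cases h : tot + n = cnt * S
    · rw [if_pos h, if_pos (h1.mp h), h2]
    · rw [if_neg h, if_neg (fun hc => h (h1.mpr hc)), h2]

theorem innerA_eq (S : Int) (seg : List Int) (tot cnt s : Int) (hs : s < 1000000000) :
    innerA S seg tot cnt s = min (s + kcount S seg tot cnt) 1000000000 := by
  induction seg generalizing tot cnt s with
  | nil => simp [innerA, kcount]; omega
  | cons n l ih =>
    simp only [innerA, kcount]
    by_cases h : tot + n = cnt * S
    · rw [if_pos h, if_pos h]
      by_cases hc : s + 1 = 1000000000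
      · rw [if_pos hc]
        have := kcount_nonneg S l (tot + n) (cnt + 1)
        omega
      · rw [if_neg hc, ih (tot + n) (cnt + 1) (s + 1) (by omega)]
        omega
    · rw [if_neg h, if_neg h, ih (tot + n) (cnt + 1) s hs]
      omega

theorem sum_kcount_nonneg (A : List Int) (S : Int) (is : List Int) :
    0 ≤ ((is.map (fun i => kcount S (PySem.List.slice A (some i) none) 0 1)).sum) := by
  induction is with
  | nil => simp
  | cons i is ih =>
    simp only [List.map_cons, List.sum_cons]
    have := kcount_nonneg S (PySem.List.slice A (some i) none) 0 1
    omega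

theorem outerA_eq (A : List Int) (S : Int) (is : List Int) (s : Int) (hs : s < 1000000000) :
    outerA A S is s =
      min (s + (is.map (fun i => kcount S (PySem.List.slice A (some i) none) 0 1)).sum) 1000000000 := by
  induction is generalizing s with
  | nil => simp [outerA]; omega
  | cons i is ih =>
    simp only [outerA, List.map_cons, List.sum_cons]
    rw [innerA_eq S _ 0 1 s hs]
    have hk := kcount_nonneg S (PySem.List.slice A (some i) none) 0 1
    have hrest := sum_kcount_nonneg A S is
    by_cases hc : min (s + kcount S (PySem.List.slice A (some i) none) 0 1) 1000000000 = 1000000000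
    · rw [if_pos hc]; omega
    · rw [if_neg hc]
      have h1 : s + kcount S (PySem.List.slice A (some i) none) 0 1 < 1000000000 := by omega
      rw [ih _ (by omega)]
      omega

theorem pairc_eq_zcount_add (b : List Int) : pairc b = zcount b 0 + pairc b.tail := by
  cases b with
  | nil => simp [pairc, zcount]
  | cons c l => simp [pairc]

theorem count_eq_sum_ite (ks : List Int) (q : Int) :
    ((ks.count q : Int)) = (ks.map (fun x => if q - x = 0 then (1 : Int) else 0)).sum := by
  induction ks with
  | nil => simp
  | cons k ks ih =>
    simp only [List.map_cons, List.sum_cons, List.count_cons]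
    by_cases h : k = q
    · subst h; simp [ih]; omega
    · have : ¬ (q - k = 0) := by omega
      rw [if_neg this]
      simp [h, ih]

theorem hcount_eq (b : List Int) (ks : List Int) (p : Int) :
    hcount ks p b = (ks.map (fun x => zcount b (p - x))).sum + pairc b.tail := by
  induction b generalizing ks p with
  | nil => simp [hcount, zcount, pairc]
  | cons c l ih =>
    simp only [hcount]
    rw [ih (ks ++ [p + c]) (p + c)]
    simp only [List.map_append, List.sum_append, List.map_cons, List.map_nil, List.sum_cons,
      List.sum_nil]
    have hz0 : p + c - (p + c) = 0 := by ring
    rw [hz0]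
    have hswap : (ks.map (fun x => zcount (c :: l) (p - x))).sum
        = (ks.map (fun x => (if p - x + c = 0 then (1:Int) else 0) + zcount l (p - x + c))).sum := by
      simp [zcount]
    have hsplit : (ks.map (fun x => (if p - x + c = 0 then (1:Int) else 0) + zcount l (p - x + c))).sum
        = (ks.map (fun x => if p - x + c = 0 then (1:Int) else 0)).sum
          + (ks.map (fun x => zcount l (p - x + c))).sum := by
      rw [← List.sum_map_add]
    have hcnt : ((ks.count (p + c) : Int)) = (ks.map (fun x => if p - x + c = 0 then (1:Int) else 0)).sum := by
      rw [count_eq_sum_ite ks (p + c)]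
      congr 1
      apply List.map_congr_left
      intro x _
      have : (p + c - x = 0) ↔ (p - x + c = 0) := by omega
      simp [this]
    have harg : (ks.map (fun x => zcount l (p + c - x))).sum = (ks.map (fun x => zcount l (p - x + c))).sum := by
      congr 1
      apply List.map_congr_left
      intro x _
      congr 1
      ring
    have htail : zcount l ((0:Int)) + pairc l.tail = pairc l := by
      rw [pairc_eq_zcount_add l]
    rw [List.tail_cons, hswap, hsplit, ← hcnt, harg]
    omega

theorem hcount_zero (b : List Int) : hcount [0] 0 b = pairc b := by
  rw [hcount_eq]
  simp only [List.map_cons, List.map_nil, List.sum_cons, List.sum_nil]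
  have : (0 : Int) - 0 = 0 := by ring
  rw [this]
  have h := pairc_eq_zcount_add b
  omega

theorem pairc_eq_sum (b : List Int) :
    pairc b = ((List.range b.length).map (fun k => zcount (b.drop k) 0)).sum := by
  induction b with
  | nil => simp [pairc]
  | cons c l ih =>
    simp only [pairc, List.length_cons, List.range_succ_eq_map, List.map_cons, List.sum_cons,
      List.drop_zero, List.map_map]
    rw [ih]
    congr 1

-- B's fold invariant: counts is the histogram of ks
theorem bfold_total (S : Int) (l : List Int) (d : PySem.Dict Int Int) (ks : List Int) (p t : Int)
    (hd : ∀ x, d.getD x 0 = (ks.count x : Int)) :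
    (l.foldl (bStep S) (d, p, t)).2.2 = t + hcount ks p (l.map (· - S)) := by
  induction l generalizing d ks p t with
  | nil => simp [hcount]
  | cons a l ih =>
    simp only [List.foldl_cons, List.map_cons, hcount, bStep]
    rw [ih _ (ks ++ [p + (a - S)]) _ _ ?_]
    · rw [hd]; ring
    · intro x
      rw [PySem.Dict.getD_insert]
      by_cases hx : x = p + (a - S)
      · subst hx
        rw [if_pos rfl, hd]
        simp
      · rw [if_neg hx, hd]
        have hc : (ks ++ [p + (a - S)]).count x = ks.count x := by
          rw [List.count_append]
          simp [List.count_singleton]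
          omega
        rw [hc]

theorem solution_alt_eq (A : List Int) (S : Int) :
    solution_alt A S = min (pairc (A.map (· - S))) 1000000000 := by
  unfold solution_alt
  have hd : ∀ x : Int, (PySem.Dict.ofList [((0 : Int), (1 : Int))]).getD x 0 = (([(0 : Int)].count x : Int)) := by
    intro x
    have : PySem.Dict.ofList [((0 : Int), (1 : Int))] = PySem.Dict.empty.insert 0 1 := by decide
    rw [this, PySem.Dict.getD_insert]
    by_cases hx : x = 0
    · subst hx; simp
    · simp [hx, PySem.Dict.getD_empty, Ne.symm hx]
  simp only []
  rw [bfold_total S A _ [0] 0 0 hd, hcount_zero]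
  simp

theorem solution_eq (A : List Int) (S : Int) :
    solution A S = min (pairc (A.map (· - S))) 1000000000 := by
  unfold solution
  rw [outerA_eq A S _ 0 (by omega)]
  have hr : PySem.List.pyRange 0 (A.length : Int) 1 = (List.range A.length).map (fun k : ℕ => (k : Int)) := by
    rw [PySem.List.pyRange_one]
    simp only [Int.sub_zero, Int.toNat_natCast, zero_add]
  rw [hr, List.map_map]
  have hterm : ∀ (k : ℕ), (kcount S (PySem.List.slice A (some (k : Int)) none) 0 1)
      = zcount ((A.map (· - S)).drop k) 0 := by
    intro k
    rw [PySem.List.slice_from_natCast, kcount_eq_zcount]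
    simp [List.map_drop]
  have : (List.range A.length).map ((fun i => kcount S (PySem.List.slice A (some i) none) 0 1) ∘ (fun k : ℕ => (k : Int)))
      = (List.range A.length).map (fun k => zcount ((A.map (· - S)).drop k) 0) := by
    apply List.map_congr_left
    intro k _
    exact hterm k
  rw [this]
  have hlen : A.length = (A.map (· - S)).length := by simp
  rw [hlen, ← pairc_eq_sum]
  simp

-- ===== VERDICT (by name: the statement is the Claim_ definition above) =====
theorem solution_spec : Claim_equal_solution := by
  intro A S _
  unfold Spec_solution
  rw [solution_eq, solution_alt_eq]
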